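-- pv_equiv track=rewrite | github.com/yyuan29/project001 | markdown_compiler/util/line_functions.py | compile_bold_stars
-- ===== SOURCE A (Python) =====
-- def compile_bold_stars(line):
--     '''
--     Convert "**bold**" to "<b>bold</b>".
--
--     HINT:
--     This function is similar to the strikethrough function.
--
--     >>> compile_bold_stars('**This is bold!** This is not bold.')
--     '<b>This is bold!</b> This is not bold.'
--     >>> compile_bold_stars('**This is bold!**')
--     '<b>This is bold!</b>'
--     >>> compile_bold_stars('This is **bold**!')
--     'This is <b>bold</b>!'
--     >>> compile_bold_stars('This is not **bold!')
--     'This is not **bold!'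
--     >>> compile_bold_stars('**')
--     '**'
--     '''
--     result = ""
--     i = 0
--     while i < len(line):
--         if line[i:i + 2] == "**" and line.find("**", i + 2) != -1:
--             end = line.find("**", i + 2)
--             if end != -1:
--                 result += "<b>" + line[i + 2: end] + "</b>"
--                 i = end + 2
--             else:
--                 result += line[i]
--                 i += 1
--         else:
--             result += line[i]
--             i += 1
--
--     return result
-- ===== SOURCE B (Python) =====
-- def compile_bold_stars(line):
--     parts = line.split('**')
--     out = [parts[0]]
--     i = 1
--     while i < len(parts):
--         if i + 1 < len(parts):
--             out.append('<b>' + parts[i] + '</b>')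
--             out.append(parts[i + 1])
--             i += 2
--         else:
--             out.append('**' + parts[i])
--             i += 1
--     return ''.join(out)
-- ===== Notes on version B (the rewrite author's own statement) =====
-- stated objective: faster
-- what changed: Replaces the char-by-char index scan with repeated find() and string += by a single line.split('**') followed by one pairwise pass over the parts list joined at the end (wrap each pair, re-emit an unpaired trailing delimiter literally).
import Mathlib
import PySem

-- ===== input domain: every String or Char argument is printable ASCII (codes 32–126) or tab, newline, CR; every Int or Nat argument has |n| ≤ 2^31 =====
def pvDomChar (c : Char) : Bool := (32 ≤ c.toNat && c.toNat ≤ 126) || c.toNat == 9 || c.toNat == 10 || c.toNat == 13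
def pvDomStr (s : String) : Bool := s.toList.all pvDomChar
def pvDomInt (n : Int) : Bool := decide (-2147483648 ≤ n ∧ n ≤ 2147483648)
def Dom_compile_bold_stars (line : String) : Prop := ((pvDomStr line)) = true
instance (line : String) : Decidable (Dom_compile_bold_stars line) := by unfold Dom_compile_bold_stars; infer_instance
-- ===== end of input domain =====

-- B replaces A's char-by-char index scan with string += (quadratic concatenation) by
-- split('**') plus one pairwise pass over the parts, joined once (objective: faster,
-- measured); same return value on every input.

-- ===== PORT A =====
-- A's while loop over the index i, with the accumulated result string; each iteration
-- either wraps a '**'-delimited segment (i jumps past its closing '**') or emits line[i].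
def compileBoldGoA (s : List Char) (i : Nat) (result : List Char) : List Char :=
  if h : i < s.length then
    if hc : PySem.Chars.slice s (some (i : Int)) (some ((i : Int) + 2)) = ['*', '*'] ∧
        PySem.Chars.findFrom s ['*', '*'] ((i : Int) + 2) ≠ -1 then
      -- end = line.find("**", i + 2)
      let e := PySem.Chars.findFrom s ['*', '*'] ((i : Int) + 2)
      if e ≠ -1 then
        compileBoldGoA s (e.toNat + 2)
          (result ++ "<b>".toList ++ PySem.Chars.slice s (some ((i : Int) + 2)) (some e) ++ "</b>".toList)
      else
        -- dead branch of A (the outer condition already checked find ≠ -1), kept for fidelity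
        compileBoldGoA s (i + 1) (result ++ [s[i]])
    else
      compileBoldGoA s (i + 1) (result ++ [s[i]])
  else result
  termination_by s.length - i
  decreasing_by
  · -- wrap branch: e points at an occurrence at position ≥ i + 2
    have h2 : i + 2 ≤ s.length := by
      have := congrArg List.length hc.1
      rw [PySem.Chars.slice_eq_listSlice] at this
      have hsl : PySem.List.slice s (some (i : Int)) (some ((i : Int) + 2)) = (s.drop i).take 2 := by
        have := PySem.List.slice_natCast_add s i 2
        simpa using this
      rw [hsl] at this
      simp at this
      omega
    have hs := PySem.Chars.findFrom_natCast_spec s ['*', '*'] (i + 2) (by exact_mod_cast h2)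
      (by push_cast; exact hc.2)
    push_cast at hs
    omega
  · omega
  · omega

def compile_bold_stars (line : String) : String :=
  String.mk (compileBoldGoA line.toList 0 [])

-- ===== PORT B =====
-- Source B's while loop over the parts index i: two parts consumed when a closing '**'
-- exists (i + 1 < len(parts)), else the unpaired trailing '**' is re-emitted literally.
def compileBoldPairs : List (List Char) → List Char
  | [] => []
  | [p] => "**".toList ++ p
  | p :: q :: rest => "<b>".toList ++ p ++ "</b>".toList ++ q ++ compileBoldPairs rest

def compile_bold_stars_alt (line : String) : String :=
  let parts := PySem.Chars.splitOn line.toList "**".toList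
  String.mk (parts.headD [] ++ compileBoldPairs parts.tail)

-- ===== PRECONDITION & SPEC =====
def Spec_compile_bold_stars (line : String) (out : String) : Prop := out = compile_bold_stars_alt line
instance (line : String) (out : String) : Decidable (Spec_compile_bold_stars line out) := by unfold Spec_compile_bold_stars; infer_instance

-- ===== CLAIM (what is proved, stated in full; the proofs are below) =====
def Claim_equal_compile_bold_stars : Prop := ∀ (line : String), Dom_compile_bold_stars line → Spec_compile_bold_stars line (compile_bold_stars line)

-- ===== LEMMAS AND PROOFS =====

-- A's scan, reformulated on the suffix of the line still to be processed.
def fB (t : List Char) : List Char :=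
  if h : ['*', '*'] <+: t ∧ PySem.Chars.find (t.drop 2) ['*', '*'] ≠ -1 then
    let m := (PySem.Chars.find (t.drop 2) ['*', '*']).toNat
    "<b>".toList ++ (t.drop 2).take m ++ "</b>".toList ++ fB (t.drop (2 + m + 2))
  else
    match t with
    | [] => []
    | c :: r => c :: fB r
  termination_by t.length
  decreasing_by
  · have : t ≠ [] := by rintro rfl; exact absurd h.1 (by simp [List.prefix_iff_eq_take])
    simp [List.length_drop]
    cases t with
    | nil => simp_all
    | cons a r => simp
  · simp

-- Pure recursion computing line.split('**') (proved equal to PySem.Chars.splitOn below).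
def SRsplit (t : List Char) : List (List Char) :=
  if h : ['*', '*'] <+: t then [] :: SRsplit (t.drop 2)
  else
    match t with
    | [] => [[]]
    | c :: r => (SRsplit r).modifyHead (c :: ·)
  termination_by t.length
  decreasing_by
  · have : 2 ≤ t.length := h.length_le
    simp [List.length_drop]; omega
  · simp

theorem SRsplit_ne_nil (t : List Char) : SRsplit t ≠ [] := by
  fun_induction SRsplit t with
  | case1 => simp
  | case2 => simp
  | case3 c r hp ih => cases h' : SRsplit r <;> simp_all

-- splitOn.go computes SRsplit (fuel is sufficient)
theorem splitOn_go_eq (fuel : Nat) (t cur : List Char) (acc : List (List Char))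
    (hf : t.length < fuel) :
    PySem.Chars.splitOn.go ['*', '*'] fuel t cur acc =
      acc.reverse ++ (SRsplit t).modifyHead (cur.reverse ++ ·) := by
  induction fuel generalizing t cur acc with
  | zero => omega
  | succ f ih =>
    cases t with
    | nil =>
      rw [PySem.Chars.splitOn.go, SRsplit]
      · simp
      · omega
    | cons c rest =>
      rw [PySem.Chars.splitOn.go]
      by_cases hp : ['*', '*'] <+: (c :: rest)
      · have hb : List.isPrefixOf ['*', '*'] (c :: rest) = true := by
          simpa [List.isPrefixOf_iff_prefix] using hp
        rw [if_pos hb]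
        have hlen : (List.drop (['*', '*'].length) (c :: rest)).length < f := by
          simp at hf ⊢; omega
        rw [ih _ _ _ hlen]
        conv_rhs => rw [SRsplit]
        rw [dif_pos hp]
        cases hsr : SRsplit (List.drop 2 (c :: rest)) with
        | nil => exact absurd hsr (SRsplit_ne_nil _)
        | cons x xs =>
          have h2 : SRsplit rest.tail = x :: xs := by simpa using hsr
          simp [h2]
      · rw [if_neg (show ¬ (List.isPrefixOf ['*', '*'] (c :: rest) = true) by
          simpa [List.isPrefixOf_iff_prefix] using hp)]
        rw [ih _ _ _ (by simp at hf ⊢; omega)]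
        conv_rhs => rw [SRsplit]
        rw [dif_neg hp]
        cases hsr : SRsplit rest with
        | nil => exact absurd hsr (SRsplit_ne_nil rest)
        | cons x xs => simp [hsr]

theorem splitOn_eq_SRsplit (s : List Char) :
    PySem.Chars.splitOn s ['*', '*'] = SRsplit s := by
  rw [PySem.Chars.splitOn, splitOn_go_eq _ _ _ _ (by omega)]
  cases hsr : SRsplit s with
  | nil => exact absurd hsr (SRsplit_ne_nil s)
  | cons x xs => simp

-- find.go shifted by k
theorem find_go_shift (sub l : List Char) (k : Nat) :
    PySem.Chars.find.go sub l k =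
      if PySem.Chars.find l sub = -1 then -1 else PySem.Chars.find l sub + k := by
  induction l generalizing k with
  | nil =>
    rw [PySem.Chars.find.go, PySem.Chars.find, PySem.Chars.find.go]
    by_cases he : sub.isEmpty <;> simp [he]
  | cons c r ih =>
    rw [PySem.Chars.find.go]
    conv_rhs => rw [PySem.Chars.find, PySem.Chars.find.go]
    by_cases hp : sub.isPrefixOf (c :: r)
    · simp [hp]
    · simp only [hp, if_false, Bool.false_eq_true]
      rw [ih (k + 1), ih 1]
      have h0 : PySem.Chars.find r sub = -1 ∨ 0 ≤ PySem.Chars.find r sub := by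
        rcases Int.lt_or_le (PySem.Chars.find r sub) 0 with h | h
        · left
          rcases Int.lt_or_le (PySem.Chars.find r sub) (-1) with h' | h'
          · exact absurd (PySem.Chars.neg_one_le_find r sub) (by omega)
          · omega
        · right; exact h
      rcases h0 with h | h
      · simp [h]
      · rw [if_neg (by omega), if_neg (by omega)]
        push_cast
        omega

theorem find_cons_of_not_prefix {sub : List Char} {c : Char} {r : List Char}
    (h : ¬ sub.isPrefixOf (c :: r)) :
    PySem.Chars.find (c :: r) sub =
      if PySem.Chars.find r sub = -1 then -1 else PySem.Chars.find r sub + 1 := by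
  rw [PySem.Chars.find, PySem.Chars.find.go, if_neg (by simp [h]), find_go_shift]
  norm_num

theorem SRsplit_no_occ {t : List Char} (h : ¬ ['*', '*'] <:+: t) : SRsplit t = [t] := by
  fun_induction SRsplit t with
  | case1 t hp ih => exact absurd hp.isInfix h
  | case2 => rfl
    | case3 c r hp ih =>
    rw [ih (fun hr => h (List.infix_cons hr))]
    rfl

theorem SRsplit_occ {t : List Char} (h : ['*', '*'] <:+: t) :
    SRsplit t = t.take (PySem.Chars.find t ['*', '*']).toNat ::
      SRsplit (t.drop ((PySem.Chars.find t ['*', '*']).toNat + 2)) := by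
  fun_induction SRsplit t with
  | case1 t hp ih =>
    have hnil : t ≠ [] := by rintro rfl; simp [List.prefix_iff_eq_take] at hp
    obtain ⟨c, r, rfl⟩ := List.exists_cons_of_ne_nil hnil
    have hf : PySem.Chars.find (c :: r) ['*', '*'] = 0 := by
      rw [PySem.Chars.find, PySem.Chars.find.go,
        if_pos (by simpa [List.isPrefixOf_iff_prefix] using hp)]
      norm_num
    simp [hf]
  | case2 => simp at h
  | case3 c r hp ih =>
    have hr : ['*', '*'] <:+: r := by
      rcases (List.infix_cons_iff.mp h) with h' | h'
      · exact absurd h' hp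
      · exact h'
    have hfr : PySem.Chars.find r ['*', '*'] ≠ -1 := (PySem.Chars.find_ne_neg_one_iff r _).mpr hr
    have hfr0 : 0 ≤ PySem.Chars.find r ['*', '*'] := (PySem.Chars.find_nonneg_iff r _).mpr hr
    have hfc : PySem.Chars.find (c :: r) ['*', '*'] = PySem.Chars.find r ['*', '*'] + 1 := by
      rw [find_cons_of_not_prefix (by simpa [List.isPrefixOf_iff_prefix] using hp), if_neg hfr]
    rw [ih hr]
    rw [hfc]
    have ht : (PySem.Chars.find r ['*', '*'] + 1).toNat = (PySem.Chars.find r ['*', '*']).toNat + 1 := by omega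
    simp [ht]

-- NoPair: no position j carries an opening '**' with a closing '**' at j+2 or later
theorem fB_id {t : List Char}
    (h : ∀ j : Nat, ['*', '*'] <+: t.drop j → ¬ ['*', '*'] <:+: t.drop (j + 2)) :
    fB t = t := by
  fun_induction fB t with
  | case1 t hc m ih =>
    have h0 : ['*', '*'] <+: t.drop 0 := by simpa using hc.1
    have h2 := h 0 h0
    simp only [Nat.zero_add] at h2
    exact absurd ((PySem.Chars.find_ne_neg_one_iff _ _).mp hc.2) h2
  | case2 => rfl
  | case3 c r hc ih =>
    rw [ih (fun j hj => by
      have := h (j + 1)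
      simp only [List.drop_succ_cons] at this
      exact this hj)]

-- B's value, suffix form
def bfB (t : List Char) : List Char :=
  (SRsplit t).headD [] ++ compileBoldPairs (SRsplit t).tail

theorem fB_nil : fB [] = [] := by
  rw [fB]; simp

theorem bfB_nil : bfB [] = [] := by
  unfold bfB; rw [SRsplit]; simp [compileBoldPairs]

theorem fB_eq_bfB_aux : ∀ (n : Nat) (t : List Char), t.length ≤ n → fB t = bfB t := by
  intro n
  induction n with
  | zero =>
    intro t ht
    have : t = [] := by cases t <;> simp_all
    subst this
    rw [fB_nil, bfB_nil]
  | succ n ih =>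
    intro t ht
    by_cases hp : ['*', '*'] <+: t
    · by_cases hocc2 : ['*', '*'] <:+: (t.drop 2)
      · -- a closing '**' exists: both sides wrap the first bold segment
        have hfne : PySem.Chars.find (t.drop 2) ['*', '*'] ≠ -1 :=
          (PySem.Chars.find_ne_neg_one_iff _ _).mpr hocc2
        set m := (PySem.Chars.find (t.drop 2) ['*', '*']).toNat with hm
        rw [fB, dif_pos ⟨hp, hfne⟩]
        have hS : SRsplit t = [] :: (t.drop 2).take m ::
            SRsplit ((t.drop 2).drop (m + 2)) := by
          rw [SRsplit, dif_pos hp, SRsplit_occ hocc2]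
        have hdd : (t.drop 2).drop (m + 2) = t.drop (2 + m + 2) := by
          rw [List.drop_drop, show 2 + (m + 2) = 2 + m + 2 by omega]
        cases hL : SRsplit ((t.drop 2).drop (m + 2)) with
        | nil => exact absurd hL (SRsplit_ne_nil _)
        | cons q L =>
          have hrec : fB (t.drop (2 + m + 2)) = bfB (t.drop (2 + m + 2)) := by
            apply ih
            simp only [List.length_drop]
            omega
          have hrhs : bfB (t.drop (2 + m + 2)) = q ++ compileBoldPairs L := by
            unfold bfB
            rw [← hdd, hL]
            simp
          unfold bfB
          rw [hS, hL]
          simp only [List.headD_cons, List.tail_cons, compileBoldPairs]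
          rw [hrec, hrhs]
          simp [hm]
      · -- the opening '**' is unpaired: A re-emits everything literally, B re-emits '**' + rest
        have hp2 : ['*', '*'] <+: t := hp
        obtain ⟨u, hu⟩ : ∃ u, ['*', '*'] ++ u = t := hp2
        have hid : fB t = t := by
          apply fB_id
          intro j hj hinf
          apply hocc2
          have hjd : t.drop (j + 2) = (t.drop 2).drop j := by
            rw [List.drop_drop, show 2 + j = j + 2 by omega]
          rw [hjd] at hinf
          exact hinf.trans (List.drop_suffix j (t.drop 2)).isInfix
        rw [hid]
        unfold bfB
        rw [SRsplit, dif_pos hp, SRsplit_no_occ hocc2]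
        subst hu
        simp [compileBoldPairs]
    · cases t with
      | nil => rw [fB_nil, bfB_nil]
      | cons c r =>
        rw [fB, dif_neg (by rintro ⟨h1, -⟩; exact hp h1)]
        unfold bfB
        rw [SRsplit, dif_neg hp]
        cases hL : SRsplit r with
        | nil => exact absurd hL (SRsplit_ne_nil _)
        | cons x xs =>
          have hrec : fB r = bfB r := ih r (by simp at ht; omega)
          have hr : bfB r = x ++ compileBoldPairs xs := by unfold bfB; rw [hL]; simp
          simp only [hL, List.modifyHead_cons, List.headD_cons, List.tail_cons]
          rw [hrec, hr]
          simp

theorem fB_eq_bfB (t : List Char) : fB t = bfB t :=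
  fB_eq_bfB_aux t.length t le_rfl

theorem fB_cons_of_not {c : Char} {r : List Char}
    (h : ¬ (['*', '*'] <+: (c :: r) ∧ PySem.Chars.find ((c :: r).drop 2) ['*', '*'] ≠ -1)) :
    fB (c :: r) = c :: fB r := by
  rw [fB, dif_neg h]

theorem fB_wrap {t : List Char}
    (h : ['*', '*'] <+: t ∧ PySem.Chars.find (t.drop 2) ['*', '*'] ≠ -1) :
    fB t = "<b>".toList ++ (t.drop 2).take (PySem.Chars.find (t.drop 2) ['*', '*']).toNat ++
      "</b>".toList ++ fB (t.drop (2 + (PySem.Chars.find (t.drop 2) ['*', '*']).toNat + 2)) := by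
  rw [fB, dif_pos h]

theorem goA_eq_fB_aux : ∀ (n : Nat) (s : List Char) (i : Nat) (res : List Char),
    i ≤ s.length → s.length - i ≤ n → compileBoldGoA s i res = res ++ fB (s.drop i) := by
  intro n
  induction n with
  | zero =>
    intro s i res hi hn
    have hie : i = s.length := by omega
    rw [compileBoldGoA, dif_neg (by omega), hie, List.drop_length, fB_nil, List.append_nil]
  | succ n ih =>
    intro s i res hi hn
    by_cases h : i < s.length
    · have hA2 : PySem.Chars.slice s (some (i : Int)) (some ((i : Int) + 2)) = (s.drop i).take 2 := by
        have := PySem.List.slice_natCast_add s i 2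
        simpa using this
      have hdd2 : (s.drop i).drop 2 = s.drop (i + 2) := by
        rw [List.drop_drop]
      by_cases hpp : ['*', '*'] <+: s.drop i
      · have hp2 : (s.drop i).take 2 = ['*', '*'] := (List.prefix_iff_eq_take.mp hpp).symm
        have h2 : i + 2 ≤ s.length := by
          have := hpp.length_le
          simp at this
          omega
        have hff : PySem.Chars.findFrom s ['*', '*'] ((i : Int) + 2) =
            if PySem.Chars.find (s.drop (i + 2)) ['*', '*'] = -1 then -1
            else ((i + 2 : Nat) : Int) + PySem.Chars.find (s.drop (i + 2)) ['*', '*'] := by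
          have := PySem.Chars.findFrom_natCast s ['*', '*'] (i + 2) (by exact_mod_cast h2)
          rw [show ((i : Int) + 2) = (((i + 2 : Nat) : Int)) by push_cast; ring]
          exact this
        by_cases hocc : PySem.Chars.find (s.drop (i + 2)) ['*', '*'] = -1
        · -- '**' at i but no closing '**': A emits char by char
          rw [compileBoldGoA, dif_pos h,
            dif_neg (fun hcnd => hcnd.2 (by rw [hff, if_pos hocc]))]
          rw [ih s (i + 1) _ (by omega) (by omega)]
          have hcons : s.drop i = s[i] :: s.drop (i + 1) := List.drop_eq_getElem_cons h
          rw [hcons, fB_cons_of_not (by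
            rintro ⟨-, hf2⟩
            rw [← hcons] at hf2
            rw [hdd2] at hf2
            exact hf2 hocc)]
          simp
        · -- '**' at i with a closing '**': both wrap
          have hFm1 : (-1 : Int) ≤ PySem.Chars.find (s.drop (i + 2)) ['*', '*'] :=
            PySem.Chars.neg_one_le_find _ _
          have hF0 : 0 ≤ PySem.Chars.find (s.drop (i + 2)) ['*', '*'] := by omega
          have hspec := (PySem.Chars.find_spec hF0).1
          set F := PySem.Chars.find (s.drop (i + 2)) ['*', '*'] with hFdef
          have hcnd : PySem.Chars.slice s (some (i : Int)) (some ((i : Int) + 2)) = ['*', '*'] ∧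
              PySem.Chars.findFrom s ['*', '*'] ((i : Int) + 2) ≠ -1 :=
            ⟨by rw [hA2, hp2], by rw [hff, if_neg hocc]; omega⟩
          rw [compileBoldGoA, dif_pos h, dif_pos hcnd]
          rw [if_pos (show ¬ PySem.Chars.findFrom s ['*', '*'] ((i : Int) + 2) = -1 from hcnd.2)]
          -- the occurrence F points at: gives the length bound
          have hlb : F.toNat + 2 ≤ s.length - (i + 2) := by
            have := hspec.length_le
            simp at this
            omega
          have he : (PySem.Chars.findFrom s ['*', '*'] ((i : Int) + 2)).toNat = i + 2 + F.toNat := by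
            rw [hff, if_neg hocc]
            omega
          have hsl2 : PySem.Chars.slice s (some ((i : Int) + 2))
              (some (PySem.Chars.findFrom s ['*', '*'] ((i : Int) + 2))) =
              (s.drop (i + 2)).take F.toNat := by
            rw [hff, if_neg hocc]
            rw [PySem.Chars.slice_eq_listSlice]
            have h3 := PySem.List.slice_natCast_add s (i + 2) F.toNat
            rw [show ((i : Int) + 2) = ((i + 2 : Nat) : Int) by push_cast; ring,
              show ((i + 2 : Nat) : Int) + F = ((i + 2 : Nat) : Int) + (F.toNat : Int) by omega]
            exact h3
          rw [he, hsl2]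
          rw [ih s (i + 2 + F.toNat + 2) _ (by omega) (by omega)]
          rw [fB_wrap (t := s.drop i) (by rw [hdd2, ← hFdef]; exact ⟨hpp, hocc⟩)]
          rw [hdd2, ← hFdef, List.drop_drop,
            show i + (2 + F.toNat + 2) = i + 2 + F.toNat + 2 by omega]
          simp
      · -- no '**' opening at i: both emit s[i]
        rw [compileBoldGoA, dif_pos h,
          dif_neg (fun hcnd => hpp (by rw [hA2] at hcnd; exact hcnd.1 ▸ List.take_prefix 2 (s.drop i)))]
        rw [ih s (i + 1) _ (by omega) (by omega)]
        have hcons : s.drop i = s[i] :: s.drop (i + 1) := List.drop_eq_getElem_cons h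
        rw [hcons, fB_cons_of_not (fun hcnd => hpp (hcons ▸ hcnd.1))]
        simp
    · have hie : i = s.length := by omega
      rw [compileBoldGoA, dif_neg h, hie, List.drop_length, fB_nil, List.append_nil]

theorem goA_eq_fB (s : List Char) (i : Nat) (res : List Char) (hi : i ≤ s.length) :
    compileBoldGoA s i res = res ++ fB (s.drop i) :=
  goA_eq_fB_aux (s.length - i) s i res hi le_rfl

-- ===== VERDICT (by name: the statement is the Claim_ definition above) =====
theorem compile_bold_stars_spec : Claim_equal_compile_bold_stars := by
  intro line _
  unfold Spec_compile_bold_stars compile_bold_stars compile_bold_stars_alt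
  rw [goA_eq_fB line.toList 0 [] (by omega)]
  have hsep : "**".toList = ['*', '*'] := rfl
  simp only [List.drop_zero, List.nil_append, fB_eq_bfB, bfB, hsep, splitOn_eq_SRsplit]
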